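-- pv_equiv track=rewrite | github.com/gawad1234/VLAN-APP | vlan_app.py | format_adapter_rows
-- ===== SOURCE A (Python) =====
-- from typing import Any, Dict, List, Optional
--
-- def _normalize_string(value: Optional[str]) -> str:
--     return (value or "").strip() or "(none)"
--
-- def format_adapter_rows(adapters: List[Dict[str, Any]], vlan_props: List[Dict[str, Any]]) -> List[Dict[str, str]]:
--     # Build a map from InterfaceIndex to VLAN property summaries
--     vlan_map: Dict[Any, List[str]] = {}
--     for prop in vlan_props:
--         idx = prop.get("InterfaceIndex")
--         if idx is None:
--             idx = prop.get("Name")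
--         summary = f"{_normalize_string(prop.get('DisplayName'))}={_normalize_string(prop.get('RegistryValue'))}"
--         vlan_map.setdefault(idx, []).append(summary)
--
--     rows: List[Dict[str, str]] = []
--     for adapter in adapters:
--         idx = adapter.get("InterfaceIndex")
--         vlan_list = vlan_map.get(idx, [])
--         rows.append(
--             {
--                 "Name": _normalize_string(adapter.get("Name")),
--                 "Description": _normalize_string(adapter.get("InterfaceDescription")),
--                 "Status": _normalize_string(adapter.get("Status")),
--                 "MAC": _normalize_string(adapter.get("MacAddress")),
--                 "VLAN Properties": "; ".join(vlan_list) or "(none found)",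
--             }
--         )
--
--     return rows
-- ===== SOURCE B (Python) =====
-- from typing import Any, Dict, List, Optional
--
-- def _normalize_string(value: Optional[str]) -> str:
--     return (value or "").strip() or "(none)"
--
-- def _vlan_key(prop: Dict[str, Any]) -> Any:
--     idx = prop.get("InterfaceIndex")
--     return prop.get("Name") if idx is None else idx
--
-- def format_adapter_rows(adapters: List[Dict[str, Any]], vlan_props: List[Dict[str, Any]]) -> List[Dict[str, str]]:
--     # No intermediate map: for each adapter, scan vlan_props for matching keys.
--     return [
--         {
--             "Name": _normalize_string(adapter.get("Name")),
--             "Description": _normalize_string(adapter.get("InterfaceDescription")),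
--             "Status": _normalize_string(adapter.get("Status")),
--             "MAC": _normalize_string(adapter.get("MacAddress")),
--             "VLAN Properties": "; ".join(
--                 f"{_normalize_string(p.get('DisplayName'))}={_normalize_string(p.get('RegistryValue'))}"
--                 for p in vlan_props
--                 if _vlan_key(p) == adapter.get("InterfaceIndex")
--             ) or "(none found)",
--         }
--         for adapter in adapters
--     ]
-- ===== Notes on version B (the rewrite author's own statement) =====
-- stated objective: alternative
-- what changed: B removes the intermediate vlan_map dict entirely: for each adapter it scans vlan_props directly, collecting summaries whose (InterfaceIndex-or-Name) key equals the adapter's InterfaceIndex, and builds the rows as one comprehension.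
import Mathlib
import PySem

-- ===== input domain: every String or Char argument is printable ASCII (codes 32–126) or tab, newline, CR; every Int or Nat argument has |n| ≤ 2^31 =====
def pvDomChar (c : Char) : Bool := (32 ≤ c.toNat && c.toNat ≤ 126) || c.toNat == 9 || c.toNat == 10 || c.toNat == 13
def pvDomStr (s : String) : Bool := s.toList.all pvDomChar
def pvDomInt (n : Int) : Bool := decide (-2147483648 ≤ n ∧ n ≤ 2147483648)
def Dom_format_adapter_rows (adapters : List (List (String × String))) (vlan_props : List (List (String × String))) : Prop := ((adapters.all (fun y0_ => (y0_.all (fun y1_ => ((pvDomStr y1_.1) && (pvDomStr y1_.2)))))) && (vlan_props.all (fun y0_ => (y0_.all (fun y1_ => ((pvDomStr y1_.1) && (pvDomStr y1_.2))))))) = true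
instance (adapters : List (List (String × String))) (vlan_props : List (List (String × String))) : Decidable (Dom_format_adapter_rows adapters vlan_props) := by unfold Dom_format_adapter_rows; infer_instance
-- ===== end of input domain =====

-- B drops the intermediate vlan_map and instead scans vlan_props per adapter (alternative decomposition, same result).


-- ===== PORT A =====
def pvNorm (v : Option String) : String :=
  let s := PySem.Str.strip (v.getD "")
  if s = "" then "(none)" else s

def pvKey (p : PySem.Dict String String) : Option String :=
  match p.get? "InterfaceIndex" with
  | some s => some s
  | none => p.get? "Name"

def pvSummary (p : PySem.Dict String String) : String :=
  pvNorm (p.get? "DisplayName") ++ "=" ++ pvNorm (p.get? "RegistryValue")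

def pvRow (a : PySem.Dict String String) (vl : List String) : List (String × String) :=
  [("Name", pvNorm (a.get? "Name")),
   ("Description", pvNorm (a.get? "InterfaceDescription")),
   ("Status", pvNorm (a.get? "Status")),
   ("MAC", pvNorm (a.get? "MacAddress")),
   ("VLAN Properties", let j := PySem.Str.join "; " vl; if j = "" then "(none found)" else j)]

-- A: build vlan_map (setdefault+append = Dict.modify with default []), then format each adapter
def format_adapter_rows (adapters : List (List (String × String))) (vlan_props : List (List (String × String))) : List (List (String × String)) :=
  let vlan_map : PySem.Dict (Option String) (List String) :=
    vlan_props.foldl (fun m pl =>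
      let p := PySem.Dict.mk pl
      m.modify (pvKey p) [] (fun l => l ++ [pvSummary p])) PySem.Dict.empty
  adapters.foldl (fun rows al =>
    let a := PySem.Dict.mk al
    rows ++ [pvRow a (vlan_map.getD (a.get? "InterfaceIndex") [])]) []


-- ===== PORT B =====
-- B: no map; per adapter, filter vlan_props by matching key and format directly
def format_adapter_rows_alt (adapters : List (List (String × String))) (vlan_props : List (List (String × String))) : List (List (String × String)) :=
  adapters.map (fun al =>
    let a := PySem.Dict.mk al
    pvRow a ((vlan_props.filter (fun pl => pvKey (PySem.Dict.mk pl) == a.get? "InterfaceIndex")).map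
      (fun pl => pvSummary (PySem.Dict.mk pl))))


-- ===== PRECONDITION & SPEC =====
def Spec_format_adapter_rows (adapters : List (List (String × String))) (vlan_props : List (List (String × String))) (out : List (List (String × String))) : Prop := out = format_adapter_rows_alt adapters vlan_props
instance (adapters : List (List (String × String))) (vlan_props : List (List (String × String))) (out : List (List (String × String))) : Decidable (Spec_format_adapter_rows adapters vlan_props out) := by unfold Spec_format_adapter_rows; infer_instance

-- ===== CLAIM (what is proved, stated in full; the proofs are below) =====
def Claim_equal_format_adapter_rows : Prop := ∀ (adapters : List (List (String × String))) (vlan_props : List (List (String × String))), Dom_format_adapter_rows adapters vlan_props → Spec_format_adapter_rows adapters vlan_props (format_adapter_rows adapters vlan_props)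

-- ===== LEMMAS AND PROOFS =====


lemma pv_foldl_append_map {α β : Type} (f : α → β) :
    ∀ (l : List α) (acc : List β), l.foldl (fun a x => a ++ [f x]) acc = acc ++ l.map f := by
  intro l
  induction l with
  | nil => simp
  | cons x xs ih => intro acc; simp [List.foldl_cons, ih]

lemma pv_getD_group (vlan_props : List (List (String × String))) (k : Option String) :
    (vlan_props.foldl (fun m pl =>
        let p := PySem.Dict.mk pl
        m.modify (pvKey p) [] (fun l => l ++ [pvSummary p])) PySem.Dict.empty).getD k []
      = (vlan_props.filter (fun pl => pvKey (PySem.Dict.mk pl) == k)).map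
          (fun pl => pvSummary (PySem.Dict.mk pl)) := by
  have h := PySem.Dict.getD_foldl_modify_append
    (l := vlan_props.map (fun pl => (pvKey (PySem.Dict.mk pl), pvSummary (PySem.Dict.mk pl))))
    (d := PySem.Dict.empty) (c := k)
  rw [List.foldl_map] at h
  simp only [h, List.filter_map, List.map_map, PySem.Dict.getD_empty, List.nil_append]
  rfl

-- ===== VERDICT (by name: the statement is the Claim_ definition above) =====
theorem format_adapter_rows_spec : Claim_equal_format_adapter_rows := by
  intro adapters vlan_props _
  unfold Spec_format_adapter_rows format_adapter_rows format_adapter_rows_alt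
  simp only [pv_getD_group, pv_foldl_append_map, List.nil_append]
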